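-- pv_equiv track=rewrite | github.com/Fadta/ffin | ffin/handlers.py | verify_filename
-- ===== SOURCE A (Python) =====
-- import string as st
--
-- def verify_filename(name: str) -> bool:
--     """
--     Returns true if the given name contains ONLY
--     ascii digits and ascii uppercase/lowercase letters
--     before the extension dot
--     """
--     FOLDER_SEPARATOR = '/'
--     NAME_SPACING = "_"
--
--     is_valid = True
--     first_letter = True
--
--     for letter in name:
--         if letter not in (st.ascii_letters + st.digits + FOLDER_SEPARATOR + NAME_SPACING):
--             if letter != '.':
--                 is_valid = False
--             break
--         first_letter = False
--
--     return (is_valid and not first_letter)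
-- ===== SOURCE B (Python) =====
-- import re
--
-- # fullmatch: a non-empty run of allowed chars, optionally followed by a literal
-- # dot and arbitrary trailing content (including newlines).
-- _PAT = re.compile(r'[A-Za-z0-9/_]+(?:\.[\s\S]*)?')
--
-- def verify_filename(name: str) -> bool:
--     return _PAT.fullmatch(name) is not None
-- ===== Notes on version B (the rewrite author's own statement) =====
-- stated objective: idiomatic
-- what changed: B replaces A's stateful character loop with break and two boolean flags by a single re.fullmatch of the declarative pattern [A-Za-z0-9/_]+(?:\.[\s\S]*)?, validated in C by the regex engine; the Lean port runs that regex via Brzozowski derivatives.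
import Mathlib
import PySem

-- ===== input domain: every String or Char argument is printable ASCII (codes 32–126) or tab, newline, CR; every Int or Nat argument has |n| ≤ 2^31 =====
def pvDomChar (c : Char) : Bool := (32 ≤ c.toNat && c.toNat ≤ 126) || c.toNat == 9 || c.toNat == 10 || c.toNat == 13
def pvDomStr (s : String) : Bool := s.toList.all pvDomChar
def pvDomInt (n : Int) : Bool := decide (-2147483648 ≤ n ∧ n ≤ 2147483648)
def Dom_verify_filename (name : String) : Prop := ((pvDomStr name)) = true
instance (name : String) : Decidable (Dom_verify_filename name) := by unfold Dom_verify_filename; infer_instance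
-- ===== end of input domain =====

-- B replaces A's stateful scan-with-break by one regex fullmatch r'[A-Za-z0-9/_]+(?:\.[\s\S]*)?';
-- same O(n) cost, a declarative pattern instead of loop state (objective: idiomatic).

-- ===== PORT A =====
-- the allowed-character string st.ascii_letters + st.digits + '/' + '_' as a char list
def pvAllowedA : List Char :=
  "abcdefghijklmnopqrstuvwxyzABCDEFGHIJKLMNOPQRSTUVWXYZ0123456789/_".toList

-- the for-loop of A: state (is_valid, first_letter), break modelled by returning the state
def pvLoopA : List Char → Bool → Bool → Bool × Bool
  | [], is_valid, first_letter => (is_valid, first_letter)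
  | c :: cs, is_valid, first_letter =>
      if ¬ pvAllowedA.contains c then
        (if c ≠ '.' then (false, first_letter) else (is_valid, first_letter))
      else
        pvLoopA cs is_valid false

def verify_filename (name : String) : Bool :=
  let r := pvLoopA name.toList true true
  r.1 && !r.2

-- ===== PORT B =====
-- Source B calls re.fullmatch; Lean has no regex engine, so the call is hand-ported as a
-- Brzozowski-derivative regex matcher, exact for fullmatch of this pattern on all inputs.
inductive PvRe : Type
  | emp                     -- matches nothing
  | eps                     -- empty string
  | cls : List Char → PvRe  -- one char from the class, e.g. [A-Za-z0-9/_]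
  | dot                     -- any one char ([\s\S])
  | seq : PvRe → PvRe → PvRe
  | alt : PvRe → PvRe → PvRe
  | star : PvRe → PvRe
deriving DecidableEq, Repr

-- smart constructors keeping derivatives small
def pvSeqS : PvRe → PvRe → PvRe
  | .emp, _ => .emp
  | _, .emp => .emp
  | .eps, s => s
  | r, s => .seq r s

def pvAltS : PvRe → PvRe → PvRe
  | .emp, s => s
  | r, .emp => r
  | r, s => .alt r s

def pvNull : PvRe → Bool
  | .emp => false
  | .eps => true
  | .cls _ => false
  | .dot => false
  | .seq r s => pvNull r && pvNull s
  | .alt r s => pvNull r || pvNull s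
  | .star _ => true

def pvDeriv : PvRe → Char → PvRe
  | .emp, _ => .emp
  | .eps, _ => .emp
  | .cls l, c => if l.contains c then .eps else .emp
  | .dot, _ => .eps
  | .seq r s, c =>
      if pvNull r then pvAltS (pvSeqS (pvDeriv r c) s) (pvDeriv s c)
      else pvSeqS (pvDeriv r c) s
  | .alt r s, c => pvAltS (pvDeriv r c) (pvDeriv s c)
  | .star r, c => pvSeqS (pvDeriv r c) (.star r)

-- the compiled pattern r'[A-Za-z0-9/_]+(?:\.[\s\S]*)?'
def pvPat : PvRe :=
  .seq (.seq (.cls pvAllowedA) (.star (.cls pvAllowedA)))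
       (.alt .eps (.seq (.cls ['.']) (.star .dot)))

def verify_filename_alt (name : String) : Bool :=
  pvNull (name.toList.foldl pvDeriv pvPat)

-- ===== PRECONDITION & SPEC =====
def Spec_verify_filename (name : String) (out : Bool) : Prop := out = verify_filename_alt name
instance (name : String) (out : Bool) : Decidable (Spec_verify_filename name out) := by unfold Spec_verify_filename; infer_instance

-- ===== CLAIM (what is proved, stated in full; the proofs are below) =====
def Claim_equal_verify_filename : Prop := ∀ (name : String), Dom_verify_filename name → Spec_verify_filename name (verify_filename name)

-- ===== LEMMAS AND PROOFS =====

-- A's loop, once first_letter is false: the valid flag becomes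
-- "every char of the stem (before the first dot) is allowed"
theorem pvLoopA_false (cs : List Char) (v : Bool) :
    pvLoopA cs v false =
      (v && (cs.takeWhile (fun c => c ≠ '.')).all (fun c => pvAllowedA.contains c), false) := by
  induction cs generalizing v with
  | nil => simp [pvLoopA]
  | cons c cs ih =>
      by_cases hmem : c ∈ pvAllowedA
      · have hdot : (c ≠ '.') := by
          intro h; subst h; revert hmem; decide
        simp [pvLoopA, hmem, ih, List.takeWhile, hdot, List.all_cons]
      · by_cases hdot : c = '.'
        · subst hdot
          simp [pvLoopA, hmem, List.takeWhile]
        · simp [pvLoopA, hmem, hdot, List.takeWhile, List.all_cons]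

-- the three reachable non-failing derivative states of pvPat
def pvSt1 : PvRe :=
  .seq (.star (.cls pvAllowedA)) (.alt .eps (.seq (.cls ['.']) (.star .dot)))
def pvSt2 : PvRe := .star .dot

theorem pvDeriv_emp (cs : List Char) : cs.foldl pvDeriv .emp = .emp := by
  induction cs with
  | nil => rfl
  | cons c cs ih => simpa [pvDeriv] using ih

theorem pvDeriv_st2 (cs : List Char) : pvNull (cs.foldl pvDeriv pvSt2) = true := by
  induction cs with
  | nil => rfl
  | cons c cs ih => simpa [pvSt2, pvDeriv, pvSeqS] using ih

theorem pvDeriv_st1 (cs : List Char) :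
    pvNull (cs.foldl pvDeriv pvSt1) =
      (cs.takeWhile (fun c => c ≠ '.')).all (fun c => pvAllowedA.contains c) := by
  induction cs with
  | nil => rfl
  | cons c cs ih =>
      by_cases hmem : c ∈ pvAllowedA
      · have hdot : (c ≠ '.') := by
          intro h; subst h; revert hmem; decide
        have hstep : pvDeriv pvSt1 c = pvSt1 := by
          simp [pvSt1, pvDeriv, pvNull, pvSeqS, pvAltS, hmem, hdot]
        simp [hstep, ih, List.takeWhile, hdot, List.all_cons, hmem]
      · by_cases hdot : c = '.'
        · subst hdot
          have hstep : pvDeriv pvSt1 '.' = pvSt2 := by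
            simp [pvSt1, pvSt2, pvDeriv, pvNull, pvSeqS, pvAltS, hmem]
          simp [hstep, pvDeriv_st2, List.takeWhile]
        · have hstep : pvDeriv pvSt1 c = .emp := by
            simp [pvSt1, pvDeriv, pvNull, pvSeqS, pvAltS, hmem, hdot]
          simp [hstep, pvDeriv_emp, pvNull, List.takeWhile, hdot, List.all_cons, hmem]

theorem pvDeriv_pat (c : Char) :
    pvDeriv pvPat c = if pvAllowedA.contains c then pvSt1 else .emp := by
  by_cases hmem : c ∈ pvAllowedA
  · simp [pvPat, pvSt1, pvDeriv, pvNull, pvSeqS, hmem]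
  · simp [pvPat, pvDeriv, pvNull, pvSeqS, hmem]

-- ===== VERDICT (by name: the statement is the Claim_ definition above) =====
theorem verify_filename_spec : Claim_equal_verify_filename := by
  intro name _
  unfold Spec_verify_filename verify_filename verify_filename_alt
  cases h : name.toList with
  | nil => simp [pvLoopA, pvPat, pvNull]
  | cons c cs =>
      by_cases hmem : c ∈ pvAllowedA
      · have hdot : (c ≠ '.') := by
          intro hh; subst hh; revert hmem; decide
        simp [pvLoopA, hmem, pvLoopA_false, List.foldl_cons, pvDeriv_pat,
              pvDeriv_st1]
      · by_cases hdot : c = '.'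
        · subst hdot
          simp [pvLoopA, hmem, List.foldl_cons, pvDeriv_pat, pvDeriv_emp, pvNull]
        · simp [pvLoopA, hmem, hdot, List.foldl_cons, pvDeriv_pat, pvDeriv_emp, pvNull]
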